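-- pv_equiv track=rewrite | github.com/nwrousell/dimspector | tests/programs/correct/ir.py | nested_while
-- ===== SOURCE A (Python) =====
-- def nested_while(n, m):
--     i = 0
--     j = 0
--     while i < n:
--         while j < m:
--             j = j + 1
--         i = i + 1
--         j = 0
--     return i
-- ===== SOURCE B (Python) =====
-- def nested_while(n, m):
--     # closed form: the outer loop runs exactly max(0, n) times; m never matters
--     return max(0, n)
-- ===== Notes on version B (the rewrite author's own statement) =====
-- stated objective: simpler
-- what changed: Replaced the nested counting loops by the closed form max(0, n); m is ignored since the inner loop never affects the returned counter.
import Mathlib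
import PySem

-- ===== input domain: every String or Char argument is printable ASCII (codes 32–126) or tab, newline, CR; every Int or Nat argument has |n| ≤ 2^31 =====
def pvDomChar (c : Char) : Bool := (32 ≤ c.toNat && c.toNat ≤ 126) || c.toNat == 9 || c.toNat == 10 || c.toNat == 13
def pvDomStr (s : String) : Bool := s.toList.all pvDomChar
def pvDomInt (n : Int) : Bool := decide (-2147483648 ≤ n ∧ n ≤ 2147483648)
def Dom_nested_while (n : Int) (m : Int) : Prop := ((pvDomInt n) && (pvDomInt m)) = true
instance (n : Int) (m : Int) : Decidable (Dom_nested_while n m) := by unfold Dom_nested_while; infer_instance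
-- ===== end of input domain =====

-- B replaces the nested counting loops by the closed form max(0, n); equivalence is proved for all inputs.

-- ===== PORT A =====
-- inner 'while j < m: j = j + 1'
def nwInner (j m : Int) : Int :=
  if j < m then nwInner (j + 1) m else j
termination_by (m - j).toNat
decreasing_by omega

-- outer 'while i < n: <inner>; i = i + 1; j = 0'
def nwOuter (i j n m : Int) : Int :=
  if i < n then
    let _j' := nwInner j m  -- inner while; j is then reset to 0
    nwOuter (i + 1) 0 n m
  else i
termination_by (n - i).toNat
decreasing_by omega

def nested_while (n : Int) (m : Int) : Int :=
  nwOuter 0 0 n m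

-- ===== PORT B =====
def nested_while_alt (n : Int) (m : Int) : Int := max 0 n

-- ===== PRECONDITION & SPEC =====
def Spec_nested_while (n : Int) (m : Int) (out : Int) : Prop := out = nested_while_alt n m
instance (n : Int) (m : Int) (out : Int) : Decidable (Spec_nested_while n m out) := by unfold Spec_nested_while; infer_instance

-- ===== CLAIM (what is proved, stated in full; the proofs are below) =====
def Claim_equal_nested_while : Prop := ∀ (n : Int) (m : Int), Dom_nested_while n m → Spec_nested_while n m (nested_while n m)

-- ===== LEMMAS AND PROOFS =====
theorem nwOuter_eval (i j n m : Int) : nwOuter i j n m = max i n := by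
  by_cases h : i < n
  · have : (n - (i+1)).toNat < (n - i).toNat := by omega
    rw [nwOuter]
    simp only [h, if_true]
    rw [nwOuter_eval (i + 1) 0 n m]
    omega
  · rw [nwOuter]; simp only [h, if_false]; omega
termination_by (n - i).toNat
decreasing_by omega

-- ===== VERDICT (by name: the statement is the Claim_ definition above) =====
theorem nested_while_spec : Claim_equal_nested_while := by
  intro n m _
  show nested_while n m = nested_while_alt n m
  unfold nested_while nested_while_alt
  simp [nwOuter_eval]
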